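-- pv_equiv track=rewrite | github.com/coleoguy/TraitTrawler | skill/scripts/statistical_qc.py | accumulation_curve
-- ===== SOURCE A (Python) =====
-- def accumulation_curve(records):
--     """
--     Build a species accumulation curve ordered by processed_date.
--     Returns list of (paper_index, cumulative_species).
--     """
--     # Sort by processed_date, then by DOI for stability
--     sorted_recs = sorted(records, key=lambda r: (r.get("processed_date", ""), r.get("doi", "")))
--
--     seen_species = set()
--     curve = []
--     paper_idx = 0
--     current_doi = None
--
--     for rec in sorted_recs:
--         doi = rec.get("doi", "")
--         if doi != current_doi:
--             paper_idx += 1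
--             current_doi = doi
--         sp = rec.get("species", "").strip()
--         if sp:
--             seen_species.add(sp)
--         curve.append((paper_idx, len(seen_species)))
--
--     # Deduplicate to one point per paper (last entry)
--     paper_curve = {}
--     for idx, count in curve:
--         paper_curve[idx] = count
--     return sorted(paper_curve.items())
-- ===== SOURCE B (Python) =====
-- def _runs(recs):
--     """Split an already-sorted record list into maximal runs of consecutive equal doi."""
--     runs = []
--     i = 0
--     n = len(recs)
--     while i < n:
--         doi = recs[i].get("doi", "")
--         j = i + 1
--         while j < n and recs[j].get("doi", "") == doi:
--             j += 1
--         runs.append(recs[i:j])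
--         i = j
--     return runs
--
--
-- def accumulation_curve(records):
--     """
--     Build a species accumulation curve ordered by processed_date.
--     Returns list of (paper_index, cumulative_species).
--     """
--     sorted_recs = sorted(records, key=lambda r: (r.get("processed_date", ""), r.get("doi", "")))
--     seen = set()
--     curve = []
--     for idx, grp in enumerate(_runs(sorted_recs), 1):
--         for rec in grp:
--             sp = rec.get("species", "").strip()
--             if sp:
--                 seen.add(sp)
--         curve.append((idx, len(seen)))
--     return curve
-- ===== Notes on version B (the rewrite author's own statement) =====
-- stated objective: simpler
-- what changed: Instead of a per-record pass carrying a paper counter and current-doi state, then deduplicating through a dict and re-sorting, B groups the sorted records into maximal runs of consecutive equal doi and emits exactly one (run_index, cumulative_species) point per run, returning that list directly with no dict and no second sort.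
import Mathlib
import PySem

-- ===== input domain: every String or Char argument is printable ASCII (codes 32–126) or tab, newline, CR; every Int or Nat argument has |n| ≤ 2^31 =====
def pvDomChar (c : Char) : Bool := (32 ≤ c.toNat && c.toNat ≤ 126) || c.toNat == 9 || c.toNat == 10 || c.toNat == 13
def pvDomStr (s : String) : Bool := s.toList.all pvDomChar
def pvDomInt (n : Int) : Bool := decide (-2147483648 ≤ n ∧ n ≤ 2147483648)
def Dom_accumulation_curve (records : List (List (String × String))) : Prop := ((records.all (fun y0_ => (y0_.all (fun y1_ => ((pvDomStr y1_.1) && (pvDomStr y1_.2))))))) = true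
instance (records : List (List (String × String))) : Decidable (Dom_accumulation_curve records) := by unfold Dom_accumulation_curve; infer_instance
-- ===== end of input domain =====

-- B replaces A's per-record pass (paper counter + current-doi state, then a dict dedup and a
-- re-sort) by grouping the sorted records into maximal runs of consecutive equal doi and
-- emitting one point per run directly: simpler, no dict and no second sort.

-- ===== PORT A =====
-- rec.get(k, "") on a Python dict (assoc list, first match)
def pvGet (r : List (String × String)) (k : String) : String :=
  PySem.Dict.getD (PySem.Dict.mk r) k ""

def accumulation_curve (records : List (List (String × String))) : List (Int × Int) :=
  let sorted_recs := PySem.List.sorted2 records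
      (fun r => pvGet r "processed_date") (fun r => pvGet r "doi")
  let fin := sorted_recs.foldl
    (fun (st : PySem.Set String × List (Int × Int) × Int × Option String) rec =>
      let doi := pvGet rec "doi"
      let pc : Int × Option String :=
        if some doi ≠ st.2.2.2 then (st.2.2.1 + 1, some doi) else (st.2.2.1, st.2.2.2)
      let sp := PySem.Str.strip (pvGet rec "species")
      let seen := if sp ≠ "" then PySem.Set.add st.1 sp else st.1
      (seen, st.2.1 ++ [(pc.1, PySem.Set.len seen)], pc.1, pc.2))
    (PySem.Set.empty, ([] : List (Int × Int)), (0 : Int), (none : Option String))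
  let paper_curve := fin.2.1.foldl
    (fun (d : PySem.Dict Int Int) p => d.insert p.1 p.2) PySem.Dict.empty
  PySem.List.sorted2 paper_curve.items (fun p => p.1) (fun p => p.2)

-- ===== PORT B =====
-- _runs: maximal runs of consecutive records with equal doi
def pvRuns (recs : List (List (String × String))) : List (List (List (String × String))) :=
  match recs with
  | [] => []
  | r :: rest =>
    (r :: rest.takeWhile (fun x => pvGet x "doi" == pvGet r "doi")) ::
      pvRuns (rest.dropWhile (fun x => pvGet x "doi" == pvGet r "doi"))
termination_by recs.length
decreasing_by
  simp only [List.length_cons]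
  exact Nat.lt_succ_of_le (List.length_dropWhile_le _ _)

def accumulation_curve_alt (records : List (List (String × String))) : List (Int × Int) :=
  let sorted_recs := PySem.List.sorted2 records
      (fun r => pvGet r "processed_date") (fun r => pvGet r "doi")
  let fin := (PySem.List.enumerate (pvRuns sorted_recs) 1).foldl
    (fun (st : PySem.Set String × List (Int × Int)) ig =>
      let seen := ig.2.foldl
        (fun s rec =>
          let sp := PySem.Str.strip (pvGet rec "species")
          if sp ≠ "" then PySem.Set.add s sp else s) st.1
      (seen, st.2 ++ [(ig.1, PySem.Set.len seen)]))
    (PySem.Set.empty, ([] : List (Int × Int)))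
  fin.2

-- ===== PRECONDITION & SPEC =====
def Spec_accumulation_curve (records : List (List (String × String))) (out : List (Int × Int)) : Prop := out = accumulation_curve_alt records
instance (records : List (List (String × String))) (out : List (Int × Int)) : Decidable (Spec_accumulation_curve records out) := by unfold Spec_accumulation_curve; infer_instance

-- ===== CLAIM (what is proved, stated in full; the proofs are below) =====
def Claim_equal_accumulation_curve : Prop := ∀ (records : List (List (String × String))), Dom_accumulation_curve records → Spec_accumulation_curve records (accumulation_curve records)

-- ===== LEMMAS AND PROOFS =====

lemma pvRuns_cons (r : List (String × String)) (rest : List (List (String × String))) :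
    pvRuns (r :: rest)
      = (r :: rest.takeWhile (fun x => pvGet x "doi" == pvGet r "doi")) ::
          pvRuns (rest.dropWhile (fun x => pvGet x "doi" == pvGet r "doi")) := by
  rw [pvRuns]

-- A's loop body, named for the proofs
def pvStepA (st : PySem.Set String × List (Int × Int) × Int × Option String)
    (rec : List (String × String)) : PySem.Set String × List (Int × Int) × Int × Option String :=
  let doi := pvGet rec "doi"
  let pc : Int × Option String :=
    if some doi ≠ st.2.2.2 then (st.2.2.1 + 1, some doi) else (st.2.2.1, st.2.2.2)
  let sp := PySem.Str.strip (pvGet rec "species")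
  let seen := if sp ≠ "" then PySem.Set.add st.1 sp else st.1
  (seen, st.2.1 ++ [(pc.1, PySem.Set.len seen)], pc.1, pc.2)

-- one-record species update
def pvAdd1 (seen : PySem.Set String) (rec : List (String × String)) : PySem.Set String :=
  let sp := PySem.Str.strip (pvGet rec "species")
  if sp ≠ "" then PySem.Set.add seen sp else seen

-- species accumulated over a run (B's inner loop)
def pvAddSp (seen : PySem.Set String) (run : List (List (String × String))) : PySem.Set String :=
  run.foldl pvAdd1 seen

-- the per-record curve entries A emits for one run, all with paper index i
def pvBlock : List (List (String × String)) → PySem.Set String → Int → List (Int × Int)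
  | [], _, _ => []
  | rec :: t, seen, i =>
    (i, PySem.Set.len (pvAdd1 seen rec)) :: pvBlock t (pvAdd1 seen rec) i

-- A's whole curve, run by run
def pvCurveRuns : List (List (List (String × String))) → PySem.Set String → Int → List (Int × Int)
  | [], _, _ => []
  | run :: rs, seen, idx => pvBlock run seen (idx + 1) ++ pvCurveRuns rs (pvAddSp seen run) (idx + 1)

-- B's output, run by run
def pvOut : List (List (List (String × String))) → PySem.Set String → Int → List (Int × Int)
  | [], _, _ => []
  | run :: rs, seen, idx =>
    (idx + 1, PySem.Set.len (pvAddSp seen run)) :: pvOut rs (pvAddSp seen run) (idx + 1)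

-- dict-insert loop body
def pvIns (d : PySem.Dict Int Int) (p : Int × Int) : PySem.Dict Int Int := d.insert p.1 p.2

lemma pvStepA_same (seen : PySem.Set String) (curve : List (Int × Int)) (idx : Int)
    (rec : List (String × String)) (d : String) (hd : pvGet rec "doi" = d) :
    pvStepA (seen, curve, idx, some d) rec
      = (pvAdd1 seen rec, curve ++ [(idx, PySem.Set.len (pvAdd1 seen rec))], idx, some d) := by
  simp [pvStepA, pvAdd1, hd]

lemma pvStepA_new (seen : PySem.Set String) (curve : List (Int × Int)) (idx : Int)
    (cur : Option String) (rec : List (String × String))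
    (hd : cur ≠ some (pvGet rec "doi")) :
    pvStepA (seen, curve, idx, cur) rec
      = (pvAdd1 seen rec, curve ++ [(idx + 1, PySem.Set.len (pvAdd1 seen rec))], idx + 1,
         some (pvGet rec "doi")) := by
  have hc : some (pvGet rec "doi") ≠ cur := fun h => hd h.symm
  simp [pvStepA, pvAdd1, hc]

lemma foldA_run (run : List (List (String × String))) (d : String)
    (hrun : ∀ x ∈ run, pvGet x "doi" = d) :
    ∀ (seen : PySem.Set String) (curve : List (Int × Int)) (idx : Int),
    run.foldl pvStepA (seen, curve, idx, some d)
      = (pvAddSp seen run, curve ++ pvBlock run seen idx, idx, some d) := by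
  induction run with
  | nil => intro seen curve idx; simp [pvAddSp, pvBlock]
  | cons rec t ih =>
    intro seen curve idx
    have h1 : pvGet rec "doi" = d := hrun rec (by simp)
    rw [List.foldl_cons, pvStepA_same seen curve idx rec d h1,
        ih (fun x hx => hrun x (by simp [hx]))]
    simp [pvAddSp, pvBlock]

lemma dropWhile_head_false {α : Type} (p : α → Bool) (l : List α) (x : α) (xs : List α)
    (h : l.dropWhile p = x :: xs) : p x = false := by
  induction l with
  | nil => simp at h
  | cons a t ih =>
    rw [List.dropWhile_cons] at h
    by_cases hp : p a = true
    · exact ih (by simpa [hp] using h)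
    · simp [hp] at h
      simp [← h.1]; simpa using hp

lemma foldA_main (sr : List (List (String × String))) :
    ∀ (seen : PySem.Set String) (curve : List (Int × Int)) (idx : Int) (cur : Option String),
    (∀ r rest, sr = r :: rest → cur ≠ some (pvGet r "doi")) →
    (sr.foldl pvStepA (seen, curve, idx, cur)).2.1
      = curve ++ pvCurveRuns (pvRuns sr) seen idx := by
  induction sr using pvRuns.induct with
  | case1 =>
    intro seen curve idx cur _
    rw [show pvRuns [] = [] from by rw [pvRuns]]
    simp [pvCurveRuns]
  | case2 r rest ih =>
    intro seen curve idx cur hcur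
    have hd : cur ≠ some (pvGet r "doi") := hcur r rest rfl
    have hsplit : r :: rest
        = (r :: rest.takeWhile (fun x => pvGet x "doi" == pvGet r "doi"))
          ++ rest.dropWhile (fun x => pvGet x "doi" == pvGet r "doi") := by
      simp [List.takeWhile_append_dropWhile]
    conv_lhs => rw [hsplit]
    rw [List.foldl_append, List.foldl_cons, pvStepA_new seen curve idx cur r hd,
        foldA_run _ (pvGet r "doi")
          (fun x hx => by simpa using List.mem_takeWhile_imp hx),
        ih _ _ _ _ (fun r' rest' h' => by
          have hf := dropWhile_head_false _ _ _ _ h'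
          simp only [beq_eq_false_iff_ne, ne_eq] at hf
          intro hcontra
          exact hf (by injection hcontra with hh; exact hh.symm))]
    rw [pvRuns_cons]
    simp [pvCurveRuns, pvBlock, pvAddSp, List.append_assoc]

-- inserting the same key repeatedly keeps only the last value
lemma insert_insert_self (d : PySem.Dict Int Int) (k : Int) (v w : Int) :
    (d.insert k v).insert k w = d.insert k w := by
  apply PySem.Dict.ext
  by_cases hc : d.contains k = true
  · have hc' : (d.insert k v).contains k = true := PySem.Dict.contains_insert_self d k v
    rw [PySem.Dict.items_insert_of_contains _ _ hc', PySem.Dict.items_insert_of_contains _ _ hc,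
        PySem.Dict.items_insert_of_contains _ _ hc, List.map_map]
    apply List.map_congr_left
    intro p _
    by_cases hp : p.1 = k <;> simp [hp]
  · have hc2 : (d.insert k v).contains k = true := PySem.Dict.contains_insert_self d k v
    rw [PySem.Dict.items_insert_of_contains _ _ hc2,
        PySem.Dict.items_insert_of_not_contains _ _ (by simpa using hc),
        PySem.Dict.items_insert_of_not_contains _ _ (by simpa using hc)]
    rw [List.map_append]
    have hc2 : ∀ (x : Int), (k, x) ∉ d.items := by
      simpa [PySem.Dict.contains, List.any_eq_true] using hc
    congr 1
    · have hmap : ∀ p ∈ d.items, (if (p.1 == k) = true then (k, w) else p) = p := by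
        intro p hp
        have hpk : ¬ p.1 = k := by
          intro h
          exact hc2 p.2 (by simpa [← h] using hp)
        simp [hpk]
      rw [List.map_congr_left hmap]
      simp
    · simp

lemma foldIns_block (run : List (List (String × String))) (hne : run ≠ []) :
    ∀ (seen : PySem.Set String) (i : Int) (d : PySem.Dict Int Int),
    (pvBlock run seen i).foldl pvIns d = d.insert i (PySem.Set.len (pvAddSp seen run)) := by
  induction run with
  | nil => exact absurd rfl hne
  | cons rec t ih =>
    intro seen i d
    rw [pvBlock, List.foldl_cons]
    by_cases ht : t = []
    · subst ht; simp [pvIns, pvAddSp, pvAdd1, pvBlock]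
    · rw [ih ht (pvAdd1 seen rec) i (pvIns d (i, PySem.Set.len (pvAdd1 seen rec)))]
      simp only [pvIns, insert_insert_self]
      simp [pvAddSp]

lemma foldIns_curve (rs : List (List (List (String × String))))
    (hne : ∀ run ∈ rs, run ≠ []) :
    ∀ (seen : PySem.Set String) (idx : Int) (d : PySem.Dict Int Int),
    (∀ k ∈ d.keys, k ≤ idx) →
    ((pvCurveRuns rs seen idx).foldl pvIns d).items = d.items ++ pvOut rs seen idx := by
  induction rs with
  | nil => intro seen idx d _; simp [pvCurveRuns, pvOut]
  | cons run rs' ih =>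
    intro seen idx d hk
    rw [pvCurveRuns, List.foldl_append,
        foldIns_block run (hne run (by simp)) seen (idx + 1) d]
    have hcont : d.contains (idx + 1) = false := by
      rw [← Bool.not_eq_true]
      intro hc
      have := hk (idx + 1) ((PySem.Dict.contains_iff_mem_keys _ _).mp hc)
      omega
    have hkeys : ∀ k ∈ (d.insert (idx + 1) (PySem.Set.len (pvAddSp seen run))).keys,
        k ≤ idx + 1 := by
      intro k hkm
      rcases (PySem.Dict.mem_keys_insert _ _ _ _).mp hkm with h | h
      · omega
      · have := hk k h; omega
    rw [ih (fun r hr => hne r (by simp [hr])) (pvAddSp seen run) (idx + 1) _ hkeys,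
        PySem.Dict.items_insert_of_not_contains _ _ hcont]
    simp [pvOut]

lemma pvRuns_ne_nil (recs : List (List (String × String))) :
    ∀ run ∈ pvRuns recs, run ≠ [] := by
  induction recs using pvRuns.induct with
  | case1 => intro run hrun; rw [pvRuns] at hrun; simp at hrun
  | case2 r rest ih =>
    rw [pvRuns_cons]
    intro run hrun
    rcases List.mem_cons.mp hrun with h | h
    · simp [h]
    · exact ih run h

lemma pvOut_fst_gt (rs : List (List (List (String × String)))) :
    ∀ (seen : PySem.Set String) (idx : Int), ∀ p ∈ pvOut rs seen idx, idx < p.1 := by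
  induction rs with
  | nil => simp [pvOut]
  | cons run rs' ih =>
    intro seen idx p hp
    rw [pvOut] at hp
    rcases List.mem_cons.mp hp with h | h
    · simp [h]
    · have := ih (pvAddSp seen run) (idx + 1) p h; omega

lemma pvOut_pairwise (rs : List (List (List (String × String))))
    (seen : PySem.Set String) (idx : Int) :
    (pvOut rs seen idx).Pairwise (fun a b => a.1 < b.1) := by
  induction rs generalizing seen idx with
  | nil => simp [pvOut]
  | cons run rs' ih =>
    rw [pvOut]
    refine List.pairwise_cons.mpr ⟨?_, ih _ _⟩
    intro p hp
    have := pvOut_fst_gt rs' (pvAddSp seen run) (idx + 1) p hp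
    omega

lemma foldl_insertBy_incr (l : List (Int × Int)) :
    ∀ (acc : List (Int × Int)),
    (∀ x ∈ l, ∀ y ∈ acc, y.1 < x.1) →
    l.Pairwise (fun a b => a.1 < b.1) →
    l.foldl (fun acc x => PySem.List.insertBy
      (fun a b => decide (a.1 < b.1) || (!decide (b.1 < a.1) && decide (a.2 < b.2))) x acc) acc
      = acc ++ l := by
  induction l with
  | nil => intro acc _ _; simp
  | cons x t ih =>
    intro acc hacc hl
    rw [List.foldl_cons, PySem.List.insertBy_of_forall_not_before _ _ _ (fun y hy => by
      have h1 : y.1 < x.1 := hacc x (by simp) y hy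
      have h2 : ¬ x.1 < y.1 := by omega
      simp [h1, h2])]
    rw [ih (acc ++ [x]) ?_ (List.pairwise_cons.mp hl).2]
    · simp
    · intro z hz y hy
      rcases List.mem_append.mp hy with h | h
      · exact hacc z (by simp [hz]) y h
      · have : y = x := by simpa using h
        subst this
        exact (List.pairwise_cons.mp hl).1 z hz

lemma sorted2_of_pairwise (l : List (Int × Int))
    (h : l.Pairwise (fun a b => a.1 < b.1)) :
    PySem.List.sorted2 l (fun p => p.1) (fun p => p.2) = l := by
  have := foldl_insertBy_incr l [] (by simp) h
  simpa [PySem.List.sorted2] using this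

lemma foldB_eq (rs : List (List (List (String × String)))) :
    ∀ (seen : PySem.Set String) (out : List (Int × Int)) (i : Int),
    ((PySem.List.enumerate rs i).foldl
      (fun (st : PySem.Set String × List (Int × Int)) ig =>
        let seen := ig.2.foldl
          (fun s rec =>
            let sp := PySem.Str.strip (pvGet rec "species")
            if sp ≠ "" then PySem.Set.add s sp else s) st.1
        (seen, st.2 ++ [(ig.1, PySem.Set.len seen)])) (seen, out)).2
      = out ++ pvOut rs seen (i - 1) := by
  induction rs with
  | nil => intro seen out i; simp [PySem.List.enumerate, pvOut]
  | cons run rs' ih =>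
    intro seen out i
    rw [show PySem.List.enumerate (run :: rs') i = (i, run) :: PySem.List.enumerate rs' (i + 1)
          from rfl,
        List.foldl_cons]
    rw [ih _ _ (i + 1)]
    have : pvOut (run :: rs') seen (i - 1)
        = (i, PySem.Set.len (pvAddSp seen run)) :: pvOut rs' (pvAddSp seen run) (i + 1 - 1) := by
      rw [pvOut]; norm_num
    rw [this]
    simp only [List.append_assoc, List.singleton_append]
    rfl

-- ===== VERDICT (by name: the statement is the Claim_ definition above) =====
theorem accumulation_curve_spec : Claim_equal_accumulation_curve := by
  intro records _
  unfold Spec_accumulation_curve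
  show accumulation_curve records = accumulation_curve_alt records
  have hA : accumulation_curve records
      = PySem.List.sorted2
          ((((PySem.List.sorted2 records (fun r => pvGet r "processed_date")
              (fun r => pvGet r "doi")).foldl pvStepA
            (PySem.Set.empty, ([] : List (Int × Int)), (0 : Int),
              (none : Option String))).2.1.foldl pvIns PySem.Dict.empty)).items
          (fun p => p.1) (fun p => p.2) := rfl
  have hB : accumulation_curve_alt records
      = ((PySem.List.enumerate (pvRuns (PySem.List.sorted2 records
            (fun r => pvGet r "processed_date") (fun r => pvGet r "doi"))) 1).foldl
          (fun (st : PySem.Set String × List (Int × Int)) ig =>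
            let seen := ig.2.foldl
              (fun s rec =>
                let sp := PySem.Str.strip (pvGet rec "species")
                if sp ≠ "" then PySem.Set.add s sp else s) st.1
            (seen, st.2 ++ [(ig.1, PySem.Set.len seen)]))
          (PySem.Set.empty, ([] : List (Int × Int)))).2 := rfl
  set sr := PySem.List.sorted2 records (fun r => pvGet r "processed_date")
      (fun r => pvGet r "doi") with hsr
  rw [hA, hB, foldB_eq (pvRuns sr) PySem.Set.empty [] 1,
      foldA_main sr PySem.Set.empty [] 0 none (fun _ _ _ => by simp),
      List.nil_append, List.nil_append,
      foldIns_curve (pvRuns sr) (pvRuns_ne_nil sr) PySem.Set.empty 0 PySem.Dict.empty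
        (by intro k hk; simp [PySem.Dict.keys, PySem.Dict.empty] at hk),
      show (PySem.Dict.empty : PySem.Dict Int Int).items = [] from rfl, List.nil_append]
  exact sorted2_of_pairwise _ (pvOut_pairwise (pvRuns sr) PySem.Set.empty 0)
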